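-- pv_equiv track=rewrite | github.com/zexumath/RiichiMahjong | src/MyLibrary.py | sanse
-- ===== SOURCE A (Python) =====
-- def sanse(shunzi):
--     l = len(shunzi)
--     tmp1 = [0] * l
--     a = [0] * l
--     for i in range(l):
--         a[i], tmp1[i] = shunzi[i][0] // 10, shunzi[i][0] % 10
--     if l == 3:
--         if a == [1, 2, 3] and tmp1[0] == tmp1[1] == tmp1[2]: return True
--     else:
--         if a == [1, 1, 2, 3]:
--             if tmp1[2] == tmp1[3] and tmp1[2] in tmp1[:2]: return True
--         elif a == [1, 2, 2, 3]:
--             if tmp1[0] == tmp1[3] and tmp1[0] in tmp1[1:3]: return True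
--         elif a == [1, 2, 3, 3]:
--             if tmp1[0] == tmp1[1] and tmp1[0] in tmp1[2:]: return True
--     return False
-- ===== SOURCE B (Python) =====
-- def sanse(shunzi):
--     if len(shunzi) not in (3, 4):
--         return False
--     pairs = [divmod(t[0], 10) for t in shunzi]
--     suits = [s for s, _ in pairs]
--     if any(x > y for x, y in zip(suits, suits[1:])):
--         return False
--     if set(suits) != {1, 2, 3}:
--         return False
--     return any((1, v) in pairs and (2, v) in pairs and (3, v) in pairs for _, v in pairs)
-- ===== Notes on version B (the rewrite author's own statement) =====
-- stated objective: simpler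
-- what changed: Replaces the four hardcoded suit-pattern branches and slice membership tests with one uniform check: suits nondecreasing, suit set exactly {1,2,3}, and some value present in all three suits.
import Mathlib
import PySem

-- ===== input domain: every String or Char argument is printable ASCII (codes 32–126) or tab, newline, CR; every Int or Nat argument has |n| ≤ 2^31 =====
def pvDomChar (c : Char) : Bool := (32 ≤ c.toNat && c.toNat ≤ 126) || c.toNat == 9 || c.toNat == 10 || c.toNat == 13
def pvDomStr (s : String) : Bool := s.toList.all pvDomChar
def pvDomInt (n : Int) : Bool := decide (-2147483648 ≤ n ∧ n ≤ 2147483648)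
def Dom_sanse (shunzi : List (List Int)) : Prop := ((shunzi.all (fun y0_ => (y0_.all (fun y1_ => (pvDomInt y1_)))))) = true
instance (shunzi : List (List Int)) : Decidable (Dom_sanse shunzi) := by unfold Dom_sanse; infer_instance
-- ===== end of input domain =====

-- B replaces A's four hardcoded sorted-suit-pattern branches by one uniform check
-- (suits nondecreasing, suit set = {1,2,3}, some value present in every suit); simpler, return value only.

-- ===== PORT A =====
-- t.headD 0 ports shunzi[i][0]; exact under Pre_ (every inner list nonempty).
-- tmp1[:2] / tmp1[1:3] / tmp1[2:] are ported with take/drop (bounds are nonnegative literals, exact).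
def sanse (shunzi : List (List Int)) : Bool :=
  let l := shunzi.length
  let a := shunzi.map (fun t => PySem.Int.floordiv (t.headD 0) 10)
  let tmp1 := shunzi.map (fun t => PySem.Int.mod (t.headD 0) 10)
  if l = 3 then
    (a == [1, 2, 3]) && (tmp1.getD 0 0 == tmp1.getD 1 0) && (tmp1.getD 1 0 == tmp1.getD 2 0)
  else
    if a == [1, 1, 2, 3] then
      (tmp1.getD 2 0 == tmp1.getD 3 0) && (tmp1.take 2).contains (tmp1.getD 2 0)
    else if a == [1, 2, 2, 3] then
      (tmp1.getD 0 0 == tmp1.getD 3 0) && ((tmp1.drop 1).take 2).contains (tmp1.getD 0 0)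
    else if a == [1, 2, 3, 3] then
      (tmp1.getD 0 0 == tmp1.getD 1 0) && (tmp1.drop 2).contains (tmp1.getD 0 0)
    else false

-- ===== PORT B =====
-- set(suits) == {1,2,3} is ported as mutual containment (Python set equality on these finite sets).
def sanse_alt (shunzi : List (List Int)) : Bool :=
  if !(shunzi.length == 3 || shunzi.length == 4) then false
  else
    let pairs := shunzi.map (fun t =>
      (PySem.Int.floordiv (t.headD 0) 10, PySem.Int.mod (t.headD 0) 10))
    let suits := pairs.map Prod.fst
    if (suits.zip suits.tail).any (fun p => p.1 > p.2) then false
    else if !(suits.all (fun s => [(1:Int), 2, 3].contains s)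
              && [(1:Int), 2, 3].all (fun s => suits.contains s)) then false
    else pairs.any (fun p =>
      pairs.contains ((1:Int), p.2) && pairs.contains ((2:Int), p.2) && pairs.contains ((3:Int), p.2))

-- ===== PRECONDITION & SPEC =====
-- Pre_ excludes inputs with an empty inner list, on which A raises IndexError at shunzi[i][0].
def Pre_sanse (shunzi : List (List Int)) : Prop := ∀ t ∈ shunzi, t ≠ []
instance (shunzi : List (List Int)) : Decidable (Pre_sanse shunzi) := by unfold Pre_sanse; infer_instance
def pvWitness_sanse : List (List Int) := [[13], [23], [33]]
def Spec_sanse (shunzi : List (List Int)) (out : Bool) : Prop := out = sanse_alt shunzi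
instance (shunzi : List (List Int)) (out : Bool) : Decidable (Spec_sanse shunzi out) := by unfold Spec_sanse; infer_instance

-- ===== CLAIM (what is proved, stated in full; the proofs are below) =====
def Claim_equal_sanse : Prop := ∀ (shunzi : List (List Int)), Dom_sanse shunzi → Pre_sanse shunzi → Spec_sanse shunzi (sanse shunzi)

-- ===== LEMMAS AND PROOFS =====

-- ===== VERDICT (by name: the statement is the Claim_ definition above) =====
theorem sanse_spec : Claim_equal_sanse := by
  intro shunzi _ _
  unfold Spec_sanse
  match shunzi with
  | [] => rfl
  | [x] => simp [sanse, sanse_alt]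
  | [x, y] => simp [sanse, sanse_alt]
  | [x, y, z] =>
    simp only [sanse, sanse_alt, List.map_cons, List.map_nil]
    generalize PySem.Int.floordiv (x.headD 0) 10 = s1
    generalize PySem.Int.floordiv (y.headD 0) 10 = s2
    generalize PySem.Int.floordiv (z.headD 0) 10 = s3
    generalize PySem.Int.mod (x.headD 0) 10 = v1
    generalize PySem.Int.mod (y.headD 0) 10 = v2
    generalize PySem.Int.mod (z.headD 0) 10 = v3
    rw [Bool.eq_iff_iff]
    simp
    omega
  | [x, y, z, w] =>
    simp only [sanse, sanse_alt, List.map_cons, List.map_nil]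
    generalize PySem.Int.floordiv (x.headD 0) 10 = s1
    generalize PySem.Int.floordiv (y.headD 0) 10 = s2
    generalize PySem.Int.floordiv (z.headD 0) 10 = s3
    generalize PySem.Int.floordiv (w.headD 0) 10 = s4
    generalize PySem.Int.mod (x.headD 0) 10 = v1
    generalize PySem.Int.mod (y.headD 0) 10 = v2
    generalize PySem.Int.mod (z.headD 0) 10 = v3
    generalize PySem.Int.mod (w.headD 0) 10 = v4
    rw [Bool.eq_iff_iff]
    simp
    by_cases h1 : s1 = 1 ∧ s2 = 1 ∧ s3 = 2 ∧ s4 = 3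
    · obtain ⟨rfl, rfl, rfl, rfl⟩ := h1; simp; omega
    by_cases h2 : s1 = 1 ∧ s2 = 2 ∧ s3 = 2 ∧ s4 = 3
    · obtain ⟨rfl, rfl, rfl, rfl⟩ := h2; simp; omega
    by_cases h3 : s1 = 1 ∧ s2 = 2 ∧ s3 = 3 ∧ s4 = 3
    · obtain ⟨rfl, rfl, rfl, rfl⟩ := h3; simp; omega
    · simp only [h1, h2, h3, if_false]
      constructor
      · intro h; exact h.1.elim
      · intro h; exfalso; omega
  | x :: y :: z :: w :: v :: rest =>
    simp [sanse, sanse_alt]
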